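-- pv_equiv track=rewrite | github.com/flepied/etf_holdings | etf_holdings.py | _find_nport_doc
-- ===== SOURCE A (Python) =====
-- from typing import List, Dict, Optional
--
-- def _find_nport_doc(files: List[Dict]) -> Optional[str]:
--     """Find the N-PORT XML document in filing files."""
--     for f in files:
--         name = f.get("name", "")
--         if name.lower() == "primary_doc.xml":
--             return name
--
--     for f in files:
--         name = f.get("name", "").lower()
--         if name.endswith(".xml") and "nport" in name:
--             return f.get("name")
--
--     for f in files:
--         name = f.get("name", "").lower()
--         if name.endswith(".xml"):
--             return f.get("name")
--
--     return None
-- ===== SOURCE B (Python) =====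
-- from typing import List, Dict, Optional
--
-- def _find_nport_doc(files: List[Dict]) -> Optional[str]:
--     """Find the N-PORT XML document in filing files (single pass)."""
--     nport_cand = None
--     xml_cand = None
--     for f in files:
--         name = f.get("name", "")
--         low = name.lower()
--         if low == "primary_doc.xml":
--             return name
--         if nport_cand is None and low.endswith(".xml") and "nport" in low:
--             nport_cand = name
--         if xml_cand is None and low.endswith(".xml"):
--             xml_cand = name
--     return nport_cand if nport_cand is not None else xml_cand
-- ===== Notes on version B (the rewrite author's own statement) =====
-- stated objective: simpler
-- what changed: Replaced A's three sequential scans of the file list by a single pass that returns immediately on primary_doc.xml and records the first nport-xml and first any-xml candidates in two accumulators.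
import Mathlib
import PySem

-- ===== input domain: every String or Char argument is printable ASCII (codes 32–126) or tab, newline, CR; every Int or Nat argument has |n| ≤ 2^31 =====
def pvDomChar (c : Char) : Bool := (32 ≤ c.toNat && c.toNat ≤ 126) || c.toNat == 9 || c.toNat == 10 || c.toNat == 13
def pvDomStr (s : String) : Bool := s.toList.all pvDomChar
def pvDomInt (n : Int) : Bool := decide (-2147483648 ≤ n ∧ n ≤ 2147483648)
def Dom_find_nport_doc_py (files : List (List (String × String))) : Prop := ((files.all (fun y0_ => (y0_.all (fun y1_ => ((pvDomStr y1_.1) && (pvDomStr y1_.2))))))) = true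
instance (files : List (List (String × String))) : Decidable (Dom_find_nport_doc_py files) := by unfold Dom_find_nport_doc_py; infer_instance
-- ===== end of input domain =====

-- B replaces A's three sequential scans by one pass with two candidate accumulators (objective: simpler).

-- ===== PORT A =====
-- first loop: return name whose lowercase equals "primary_doc.xml"
def pvPass1 (files : List (List (String × String))) : Option String :=
  match files with
  | [] => none
  | f :: rest =>
    let name := PySem.Dict.getD (PySem.Dict.mk f) "name" ""
    if PySem.Str.lower name == "primary_doc.xml" then some name else pvPass1 rest

-- second loop: first xml name containing "nport"
def pvPass2 (files : List (List (String × String))) : Option String :=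
  match files with
  | [] => none
  | f :: rest =>
    let name := PySem.Str.lower (PySem.Dict.getD (PySem.Dict.mk f) "name" "")
    if PySem.Str.endswith name ".xml" && PySem.Str.isIn "nport" name then
      PySem.Dict.get? (PySem.Dict.mk f) "name"
    else pvPass2 rest

-- third loop: first xml name
def pvPass3 (files : List (List (String × String))) : Option String :=
  match files with
  | [] => none
  | f :: rest =>
    let name := PySem.Str.lower (PySem.Dict.getD (PySem.Dict.mk f) "name" "")
    if PySem.Str.endswith name ".xml" then
      PySem.Dict.get? (PySem.Dict.mk f) "name"
    else pvPass3 rest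

def find_nport_doc_py (files : List (List (String × String))) : Option String :=
  match pvPass1 files with
  | some s => some s
  | none =>
    match pvPass2 files with
    | some s => some s
    | none =>
      match pvPass3 files with
      | some s => some s
      | none => none

-- ===== PORT B =====
-- single pass; nport = first nport-xml candidate so far, xml = first any-xml candidate so far
def pvGoB (files : List (List (String × String))) (nport xml : Option String) : Option String :=
  match files with
  | [] => match nport with | some s => some s | none => xml
  | f :: rest =>
    let name := PySem.Dict.getD (PySem.Dict.mk f) "name" ""
    let low := PySem.Str.lower name
    if low == "primary_doc.xml" then some name
    else
      let nport' := if nport.isNone && PySem.Str.endswith low ".xml" && PySem.Str.isIn "nport" low then some name else nport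
      let xml' := if xml.isNone && PySem.Str.endswith low ".xml" then some name else xml
      pvGoB rest nport' xml'

def find_nport_doc_py_alt (files : List (List (String × String))) : Option String :=
  pvGoB files none none

-- ===== PRECONDITION & SPEC =====
def Spec_find_nport_doc_py (files : List (List (String × String))) (out : Option String) : Prop := out = find_nport_doc_py_alt files
instance (files : List (List (String × String))) (out : Option String) : Decidable (Spec_find_nport_doc_py files out) := by unfold Spec_find_nport_doc_py; infer_instance

-- ===== CLAIM (what is proved, stated in full; the proofs are below) =====
def Claim_equal_find_nport_doc_py : Prop := ∀ (files : List (List (String × String))), Dom_find_nport_doc_py files → Spec_find_nport_doc_py files (find_nport_doc_py files)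

-- ===== LEMMAS AND PROOFS =====

-- when the (lowercased, defaulted) name ends in ".xml", the "name" key is present, so
-- Python's f.get("name") is exactly the defaulted name A/B compare against
theorem pvGet?_of_endswith (f : List (String × String))
    (h : PySem.Str.endswith (PySem.Str.lower (PySem.Dict.getD (PySem.Dict.mk f) "name" "")) ".xml" = true) :
    PySem.Dict.get? (PySem.Dict.mk f) "name" = some (PySem.Dict.getD (PySem.Dict.mk f) "name" "") := by
  cases hg : PySem.Dict.get? (PySem.Dict.mk f) "name" with
  | none =>
    exfalso
    rw [PySem.Dict.getD_eq_get?_getD, hg] at h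
    exact absurd h (by decide)
  | some v =>
    rw [PySem.Dict.getD_eq_get?_getD, hg]
    rfl

-- loop invariant for B's single pass, in terms of A's three passes
theorem pvGoB_spec (files : List (List (String × String))) :
    ∀ (nport xml : Option String),
    pvGoB files nport xml =
      match pvPass1 files with
      | some s => some s
      | none =>
        match (match nport with | some s => some s | none => pvPass2 files) with
        | some s => some s
        | none =>
          match xml with
          | some s => some s
          | none => pvPass3 files := by
  induction files with
  | nil =>
    intro nport xml
    cases nport <;> cases xml <;> rfl
  | cons f rest ih =>
    intro nport xml
    simp only [pvGoB, pvPass1, pvPass2, pvPass3]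
    by_cases hp : (PySem.Str.lower (PySem.Dict.getD (PySem.Dict.mk f) "name" "") == "primary_doc.xml") = true
    · rw [if_pos hp, if_pos hp]
    · rw [if_neg hp, if_neg hp, ih]
      cases h3 : PySem.Str.endswith (PySem.Str.lower (PySem.Dict.getD (PySem.Dict.mk f) "name" "")) ".xml" with
      | true =>
        have hget := pvGet?_of_endswith f h3
        have h3' : PySem.Chars.endswith (PySem.Chars.lower (PySem.Dict.getD (PySem.Dict.mk f) "name" "").toList) ".xml".toList = true := by
          simpa using h3
        cases h4 : PySem.Str.isIn "nport" (PySem.Str.lower (PySem.Dict.getD (PySem.Dict.mk f) "name" "")) with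
        | true =>
          have h4' : PySem.Chars.isIn "nport".toList (PySem.Chars.lower (PySem.Dict.getD (PySem.Dict.mk f) "name" "").toList) = true := by
            simpa using h4
          cases nport <;> cases xml <;> simp [h3', h4', hget]
        | false =>
          have h4' : PySem.Chars.isIn "nport".toList (PySem.Chars.lower (PySem.Dict.getD (PySem.Dict.mk f) "name" "").toList) = false := by
            simpa using h4
          cases nport <;> cases xml <;> simp [h3', h4', hget]
      | false =>
        have h3' : PySem.Chars.endswith (PySem.Chars.lower (PySem.Dict.getD (PySem.Dict.mk f) "name" "").toList) ".xml".toList = false := by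
          simpa using h3
        cases nport <;> cases xml <;> simp [h3']

-- ===== VERDICT (by name: the statement is the Claim_ definition above) =====
theorem find_nport_doc_py_spec : Claim_equal_find_nport_doc_py := by
  intro files _
  unfold Spec_find_nport_doc_py find_nport_doc_py find_nport_doc_py_alt
  rw [pvGoB_spec]
  cases pvPass1 files <;> cases h2 : pvPass2 files <;> cases h3 : pvPass3 files <;> simp
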